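-- pv_equiv track=rewrite | github.com/david938-beep/Quixo | Jugable/IcebergSlide_Data/StreamingAssets/AI/AI.py | get_pieces_on_edge_of_board
-- ===== SOURCE A (Python) =====
-- def get_pieces_on_edge_of_board(board):
--     total_pieces = 0
--     rowVal = 0
--     for row in board:
--         rowVal += 1
--         colVal = 0
--         for item in row:
--             colVal += 1
--             if (item != " " and (rowVal == 1 or rowVal == 5 or colVal == 5 or colVal == 1)):
--                 total_pieces += 1
--     return total_pieces
-- ===== SOURCE B (Python) =====
-- def get_pieces_on_edge_of_board(board):
--     total = sum(1 for row in board for item in row if item != " ")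
--     interior = sum(1 for r, row in enumerate(board, 1)
--                      for c, item in enumerate(row, 1)
--                      if item != " " and r != 1 and r != 5 and c != 1 and c != 5)
--     return total - interior
-- ===== Notes on version B (the rewrite author's own statement) =====
-- stated objective: alternative
-- what changed: B computes the count by inclusion-exclusion: one aggregate count of all non-space cells minus a count of non-space interior cells (1-indexed row and column both outside {1,5}), instead of A's single per-cell edge-OR test with running row/column counters.
import Mathlib
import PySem

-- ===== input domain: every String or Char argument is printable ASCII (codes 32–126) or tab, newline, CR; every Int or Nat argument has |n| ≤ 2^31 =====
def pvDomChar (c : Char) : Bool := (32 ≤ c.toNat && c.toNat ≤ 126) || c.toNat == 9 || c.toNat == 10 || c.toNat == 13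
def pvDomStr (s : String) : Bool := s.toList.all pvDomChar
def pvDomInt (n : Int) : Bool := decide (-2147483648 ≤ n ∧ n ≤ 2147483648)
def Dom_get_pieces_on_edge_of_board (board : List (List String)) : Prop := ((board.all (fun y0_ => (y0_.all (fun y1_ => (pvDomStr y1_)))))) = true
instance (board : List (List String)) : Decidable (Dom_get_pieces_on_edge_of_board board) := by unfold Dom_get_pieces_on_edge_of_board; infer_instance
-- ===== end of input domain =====

-- B counts all non-space cells and subtracts the non-space interior cells (inclusion–exclusion)
-- instead of A's per-cell edge test with running counters; same cost, different decomposition.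

-- ===== PORT A =====
def get_pieces_on_edge_of_board (board : List (List String)) : Int :=
  (board.foldl
    (fun (st : Int × Int) row =>
      let rowVal := st.2 + 1
      let inner := row.foldl
        (fun (st2 : Int × Int) item =>
          let colVal := st2.2 + 1
          (if item ≠ " " ∧ (rowVal = 1 ∨ rowVal = 5 ∨ colVal = 5 ∨ colVal = 1)
           then st2.1 + 1 else st2.1, colVal))
        (st.1, 0)
      (inner.1, rowVal))
    (0, 0)).1

-- ===== PORT B =====
def get_pieces_on_edge_of_board_alt (board : List (List String)) : Int :=
  let total : Int := board.foldl
    (fun acc row => row.foldl (fun a item => if item ≠ " " then a + 1 else a) acc) 0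
  let interior : Int := (PySem.List.enumerate board 1).foldl
    (fun acc rp => (PySem.List.enumerate rp.2 1).foldl
      (fun a cp =>
        if cp.2 ≠ " " ∧ rp.1 ≠ 1 ∧ rp.1 ≠ 5 ∧ cp.1 ≠ 1 ∧ cp.1 ≠ 5 then a + 1 else a)
      acc) 0
  total - interior

-- ===== PRECONDITION & SPEC =====
def Spec_get_pieces_on_edge_of_board (board : List (List String)) (out : Int) : Prop := out = get_pieces_on_edge_of_board_alt board
instance (board : List (List String)) (out : Int) : Decidable (Spec_get_pieces_on_edge_of_board board out) := by unfold Spec_get_pieces_on_edge_of_board; infer_instance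

-- ===== CLAIM (what is proved, stated in full; the proofs are below) =====
def Claim_equal_get_pieces_on_edge_of_board : Prop := ∀ (board : List (List String)), Dom_get_pieces_on_edge_of_board board → Spec_get_pieces_on_edge_of_board board (get_pieces_on_edge_of_board board)

-- ===== LEMMAS AND PROOFS =====

-- pure per-row / per-board counts used to relate the two folds
def rowEdge (r : Int) : List String → Int → Int
  | [], _ => 0
  | x :: xs, c => (if x ≠ " " ∧ (r = 1 ∨ r = 5 ∨ c + 1 = 5 ∨ c + 1 = 1) then 1 else 0) + rowEdge r xs (c + 1)

def rowAll : List String → Int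
  | [] => 0
  | x :: xs => (if x ≠ " " then 1 else 0) + rowAll xs

def rowInt (r : Int) : List String → Int → Int
  | [], _ => 0
  | x :: xs, c => (if x ≠ " " ∧ r ≠ 1 ∧ r ≠ 5 ∧ c ≠ 1 ∧ c ≠ 5 then 1 else 0) + rowInt r xs (c + 1)

def bdEdge : List (List String) → Int → Int
  | [], _ => 0
  | row :: rest, r => rowEdge (r + 1) row 0 + bdEdge rest (r + 1)

def bdAll : List (List String) → Int
  | [] => 0
  | row :: rest => rowAll row + bdAll rest

def bdInt : List (List String) → Int → Int
  | [], _ => 0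
  | row :: rest, r => rowInt r row 1 + bdInt rest (r + 1)

lemma indicator (r c : Int) (x : String) :
    (if x ≠ " " ∧ (r = 1 ∨ r = 5 ∨ c = 5 ∨ c = 1) then (1 : Int) else 0)
    = (if x ≠ " " then (1 : Int) else 0)
      - (if x ≠ " " ∧ r ≠ 1 ∧ r ≠ 5 ∧ c ≠ 1 ∧ c ≠ 5 then (1 : Int) else 0) := by
  by_cases hx : x = " "
  · simp [hx]
  · by_cases he : r = 1 ∨ r = 5 ∨ c = 5 ∨ c = 1
    · rw [if_pos ⟨hx, he⟩, if_pos hx, if_neg (by tauto)]; norm_num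
    · rw [if_neg (by tauto), if_pos hx, if_pos ⟨hx, by tauto⟩]; norm_num

lemma innerA (r : Int) : ∀ (row : List String) (t c : Int),
    row.foldl
      (fun (st2 : Int × Int) item =>
        let colVal := st2.2 + 1
        (if item ≠ " " ∧ (r = 1 ∨ r = 5 ∨ colVal = 5 ∨ colVal = 1)
         then st2.1 + 1 else st2.1, colVal))
      (t, c) = (t + rowEdge r row c, c + row.length) := by
  intro row
  induction row with
  | nil => intro t c; simp [rowEdge]
  | cons x xs ih =>
      intro t c
      simp only [List.foldl_cons]
      rw [ih]
      simp only [rowEdge, Prod.mk.injEq]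
      refine ⟨by split_ifs <;> ring, by simp only [List.length_cons]; push_cast; ring⟩

lemma outerA : ∀ (board : List (List String)) (t r : Int),
    board.foldl
      (fun (st : Int × Int) row =>
        let rowVal := st.2 + 1
        let inner := row.foldl
          (fun (st2 : Int × Int) item =>
            let colVal := st2.2 + 1
            (if item ≠ " " ∧ (rowVal = 1 ∨ rowVal = 5 ∨ colVal = 5 ∨ colVal = 1)
             then st2.1 + 1 else st2.1, colVal))
          (st.1, 0)
        (inner.1, rowVal))
      (t, r) = (t + bdEdge board r, r + board.length) := by
  intro board
  induction board with
  | nil => intro t r; simp [bdEdge]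
  | cons row rest ih =>
      intro t r
      simp only [List.foldl_cons]
      rw [innerA, ih]
      simp only [bdEdge, Prod.mk.injEq]
      refine ⟨by ring, by simp only [List.length_cons]; push_cast; ring⟩

lemma innerTotal : ∀ (row : List String) (a : Int),
    row.foldl (fun a item => if item ≠ " " then a + 1 else a) a = a + rowAll row := by
  intro row
  induction row with
  | nil => intro a; simp [rowAll]
  | cons x xs ih =>
      intro a
      simp only [List.foldl_cons]
      rw [ih]
      simp only [rowAll]
      split_ifs <;> ring

lemma outerTotal : ∀ (board : List (List String)) (a : Int),
    board.foldl
      (fun acc row => row.foldl (fun a item => if item ≠ " " then a + 1 else a) acc) a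
    = a + bdAll board := by
  intro board
  induction board with
  | nil => intro a; simp [bdAll]
  | cons row rest ih =>
      intro a
      simp only [List.foldl_cons]
      rw [innerTotal, ih]
      simp only [bdAll]
      ring

lemma innerInt (r : Int) : ∀ (row : List String) (a c : Int),
    (PySem.List.enumerate row c).foldl
      (fun a cp =>
        if cp.2 ≠ " " ∧ r ≠ 1 ∧ r ≠ 5 ∧ cp.1 ≠ 1 ∧ cp.1 ≠ 5 then a + 1 else a)
      a = a + rowInt r row c := by
  intro row
  induction row with
  | nil => intro a c; simp [PySem.List.enumerate_nil, rowInt]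
  | cons x xs ih =>
      intro a c
      rw [PySem.List.enumerate_cons, List.foldl_cons, ih]
      simp only [rowInt]
      split_ifs <;> ring

lemma outerInt : ∀ (board : List (List String)) (a r : Int),
    (PySem.List.enumerate board r).foldl
      (fun acc rp => (PySem.List.enumerate rp.2 1).foldl
        (fun a cp =>
          if cp.2 ≠ " " ∧ rp.1 ≠ 1 ∧ rp.1 ≠ 5 ∧ cp.1 ≠ 1 ∧ cp.1 ≠ 5 then a + 1 else a)
        acc) a = a + bdInt board r := by
  intro board
  induction board with
  | nil => intro a r; simp [PySem.List.enumerate_nil, bdInt]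
  | cons row rest ih =>
      intro a r
      rw [PySem.List.enumerate_cons, List.foldl_cons]
      rw [innerInt, ih]
      simp only [bdInt]
      ring

lemma rowEdge_eq (r : Int) : ∀ (row : List String) (c : Int),
    rowEdge r row c = rowAll row - rowInt r row (c + 1) := by
  intro row
  induction row with
  | nil => intro c; simp [rowEdge, rowAll, rowInt]
  | cons x xs ih =>
      intro c
      simp only [rowEdge, rowAll, rowInt, ih, indicator]
      ring

lemma bdEdge_eq : ∀ (board : List (List String)) (r : Int),
    bdEdge board r = bdAll board - bdInt board (r + 1) := by
  intro board
  induction board with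
  | nil => intro r; simp [bdEdge, bdAll, bdInt]
  | cons row rest ih =>
      intro r
      simp only [bdEdge, bdAll, bdInt, ih, rowEdge_eq]
      ring

-- ===== VERDICT (by name: the statement is the Claim_ definition above) =====
theorem get_pieces_on_edge_of_board_spec : Claim_equal_get_pieces_on_edge_of_board := by
  intro board _
  show get_pieces_on_edge_of_board board = get_pieces_on_edge_of_board_alt board
  unfold get_pieces_on_edge_of_board get_pieces_on_edge_of_board_alt
  rw [outerA, outerTotal, outerInt, bdEdge_eq]
  ring
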